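-- pv_equiv track=rewrite | github.com/adampolak/first-fit | runs/results_numcolors/gen_138/main.py | _interleave_blocks
-- ===== SOURCE A (Python) =====
-- def _interleave_blocks(blocks, interleave, round_idx):
--     """
--     If interleave=False, flatten blocks in order.
--     Otherwise, round-robin across blocks, rotating visitation order each round.
--     """
--     if not interleave:
--         S = []
--         for blk in blocks:
--             S.extend(blk)
--         return S
--
--     maxlen = max((len(b) for b in blocks), default=0)
--     order = list(range(len(blocks)))
--     # reverse order on odd rounds
--     if round_idx % 2 == 1:
--         order.reverse()
--     # cyclic rotate the order to further break patterns
--     k = round_idx % len(order)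
--     order = order[k:] + order[:k]
--
--     S = []
--     for i in range(maxlen):
--         for idx in order:
--             blk = blocks[idx]
--             if i < len(blk):
--                 S.append(blk[i])
--     return S
-- ===== SOURCE B (Python) =====
-- def _interleave_blocks(blocks, interleave, round_idx):
--     """
--     If interleave=False, flatten blocks in order.
--     Otherwise, round-robin across blocks, rotating visitation order each round.
--     Decorate-sort-undecorate: each element gets its (column, rank-in-rotated-order)
--     key; a stable sort by that key yields the round-robin order.
--     """
--     if not interleave:
--         return [x for blk in blocks for x in blk]
--
--     order = list(range(len(blocks)))
--     if round_idx % 2 == 1: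
--         order.reverse()
--     k = round_idx % len(order)
--     order = order[k:] + order[:k]
--
--     tagged = [(i, r, x)
--               for r, idx in enumerate(order)
--               for i, x in enumerate(blocks[idx])]
--     tagged.sort(key=lambda t: (t[0], t[1]))
--     return [x for _, _, x in tagged]
-- ===== Notes on version B (the rewrite author's own statement) =====
-- stated objective: alternative
-- what changed: B replaces A's nested column-by-column index-stepping loops by decorate-sort-undecorate: it tags every element with its (column index, rank in the rotated visitation order) and stable-sorts the tagged list by that key, then strips the tags.
import Mathlib
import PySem

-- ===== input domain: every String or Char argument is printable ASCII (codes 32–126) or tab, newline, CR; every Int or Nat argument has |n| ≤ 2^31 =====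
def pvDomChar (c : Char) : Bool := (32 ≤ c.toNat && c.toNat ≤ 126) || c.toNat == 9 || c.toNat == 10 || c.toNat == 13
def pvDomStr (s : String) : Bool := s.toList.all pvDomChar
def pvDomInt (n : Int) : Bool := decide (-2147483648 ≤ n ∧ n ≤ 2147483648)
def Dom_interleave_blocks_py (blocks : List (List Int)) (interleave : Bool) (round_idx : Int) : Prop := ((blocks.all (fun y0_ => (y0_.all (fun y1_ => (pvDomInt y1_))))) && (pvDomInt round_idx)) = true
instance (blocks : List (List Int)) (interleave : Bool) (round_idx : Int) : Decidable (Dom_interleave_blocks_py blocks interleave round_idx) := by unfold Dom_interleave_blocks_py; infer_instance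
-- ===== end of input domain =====

-- B re-implements the interleave branch by decorate-sort-undecorate: tag each element with its
-- (column, rank-in-rotated-order) key and stable-sort, instead of A's nested index-stepping loops;
-- alternative algorithm (B pays an extra O(m log m) sort), same return value.


-- ===== PORT A =====
-- the rotated visitation order both Pythons compute literally the same way:
-- order = range(len(blocks)); reversed on odd rounds; rotated by k = round_idx % len(order)
-- (under Pre_, 0 ≤ k < len(order), so order[k:] + order[:k] = drop k ++ take k)
def pvOrder (blocks : List (List Int)) (round_idx : Int) : List Nat :=
  let order0 := List.range blocks.length
  let order1 := if PySem.Int.mod round_idx 2 = 1 then order0.reverse else order0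
  let k := (PySem.Int.mod round_idx (order1.length : Int)).toNat
  order1.drop k ++ order1.take k

def interleave_blocks_py (blocks : List (List Int)) (interleave : Bool) (round_idx : Int) : List Int :=
  if !interleave then
    -- S = []; for blk in blocks: S.extend(blk)
    blocks.foldl (fun s blk => s ++ blk) []
  else
    let maxlen := blocks.foldl (fun m b => max m b.length) 0  -- max(..., default=0)
    let order := pvOrder blocks round_idx
    -- for i in range(maxlen): for idx in order: blk = blocks[idx]; if i < len(blk): S.append(blk[i])
    (List.range maxlen).foldl (fun s i =>
      order.foldl (fun s idx =>
        let blk := blocks.getD idx []  -- idx ∈ range(len(blocks)), so exact for blocks[idx]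
        if i < blk.length then s ++ [blk.getD i 0] else s) s) []

-- ===== PORT B =====
def interleave_blocks_py_alt (blocks : List (List Int)) (interleave : Bool) (round_idx : Int) : List Int :=
  if !interleave then
    -- [x for blk in blocks for x in blk]
    blocks.flatMap (fun blk => blk)
  else
    let order := pvOrder blocks round_idx
    -- tagged = [(i, r, x) for r, idx in enumerate(order) for i, x in enumerate(blocks[idx])]
    let tagged := (order.zipIdx).flatMap (fun p =>
      ((blocks.getD p.1 []).zipIdx).map (fun q => (q.2, p.2, q.1)))
    -- tagged.sort(key=lambda t: (t[0], t[1])); return [x for _, _, x in tagged]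
    (PySem.List.sorted2 tagged (fun t => t.1) (fun t => t.2.1)).map (fun t => t.2.2)

-- ===== PRECONDITION & SPEC =====
-- Pre_ excludes blocks = [] with interleave=True, where Python A raises ZeroDivisionError
-- (round_idx % len(order) with len(order) = 0); B raises the same exception there.
def Pre_interleave_blocks_py (blocks : List (List Int)) (interleave : Bool) (round_idx : Int) : Prop :=
  interleave = true → blocks ≠ []
instance (blocks : List (List Int)) (interleave : Bool) (round_idx : Int) : Decidable (Pre_interleave_blocks_py blocks interleave round_idx) := by unfold Pre_interleave_blocks_py; infer_instance

def pvWitness_interleave_blocks_py : List (List Int) × Bool × Int := ([[1, 2], [3]], true, 1)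

def Spec_interleave_blocks_py (blocks : List (List Int)) (interleave : Bool) (round_idx : Int) (out : List Int) : Prop := out = interleave_blocks_py_alt blocks interleave round_idx
instance (blocks : List (List Int)) (interleave : Bool) (round_idx : Int) (out : List Int) : Decidable (Spec_interleave_blocks_py blocks interleave round_idx out) := by unfold Spec_interleave_blocks_py; infer_instance

-- ===== CLAIM (what is proved, stated in full; the proofs are below) =====
def Claim_equal_interleave_blocks_py : Prop := ∀ (blocks : List (List Int)) (interleave : Bool) (round_idx : Int), Dom_interleave_blocks_py blocks interleave round_idx → Pre_interleave_blocks_py blocks interleave round_idx → Spec_interleave_blocks_py blocks interleave round_idx (interleave_blocks_py blocks interleave round_idx)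

-- ===== LEMMAS AND PROOFS =====

-- running max of the row lengths (A's maxlen)
def pvMaxLen (rs : List (List Int)) : Nat := rs.foldl (fun m b => max m b.length) 0

theorem pvMaxLen_cons (b : List Int) (rs : List (List Int)) :
    pvMaxLen (b :: rs) = max b.length (pvMaxLen rs) := by
  have key : ∀ (l : List (List Int)) (a c : Nat),
      l.foldl (fun m b => max m b.length) (max a c) = max a (l.foldl (fun m b => max m b.length) c) := by
    intro l
    induction l with
    | nil => intro a c; simp
    | cons x xs ih =>
      intro a c
      simp only [List.foldl_cons]
      rw [max_assoc, ih]
  unfold pvMaxLen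
  simp only [List.foldl_cons]
  simpa using key rs b.length 0

theorem pvMaxLen_eq_zero (rs : List (List Int)) :
    pvMaxLen rs = 0 ↔ rs.all (·.isEmpty) = true := by
  induction rs with
  | nil => simp [pvMaxLen]
  | cons b t ih =>
    rw [pvMaxLen_cons]
    simp only [List.all_cons, Bool.and_eq_true, List.isEmpty_iff, ← ih]
    constructor
    · intro h
      exact ⟨List.length_eq_zero_iff.mp (by omega), by omega⟩
    · rintro ⟨h1, h2⟩
      subst h1; simp [h2]

theorem pvMaxLen_tail (rs : List (List Int)) :
    pvMaxLen (rs.map (·.tail)) = pvMaxLen rs - 1 := by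
  induction rs with
  | nil => simp [pvMaxLen]
  | cons b t ih =>
    simp only [List.map_cons]
    rw [pvMaxLen_cons, pvMaxLen_cons, ih]
    have : b.tail.length = b.length - 1 := by cases b <;> simp
    omega

theorem pvMaxLen_perm {rs rs' : List (List Int)} (h : rs.Perm rs') :
    pvMaxLen rs = pvMaxLen rs' := by
  induction h with
  | nil => rfl
  | cons x _ ih => rw [pvMaxLen_cons, pvMaxLen_cons, ih]
  | swap x y l =>
    rw [pvMaxLen_cons, pvMaxLen_cons, pvMaxLen_cons, pvMaxLen_cons]
    omega
  | trans _ _ ih1 ih2 => rw [ih1, ih2]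

-- column i of a list of rows (what A's inner loop appends for column i)
def pvCol (i : Nat) (rs : List (List Int)) : List Int := rs.filterMap (fun b => b[i]?)

-- the inner loop over order appends column i of the reordered blocks
theorem inner_loop_eq (blocks : List (List Int)) (i : Nat) (order : List Nat) (s : List Int) :
    order.foldl (fun s idx =>
        let blk := blocks.getD idx []
        if i < blk.length then s ++ [blk.getD i 0] else s) s
      = s ++ pvCol i (order.map (fun idx => blocks.getD idx [])) := by
  induction order generalizing s with
  | nil => simp [pvCol]
  | cons idx rest ih =>
    simp only [List.foldl_cons, List.map_cons]
    rw [ih]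
    unfold pvCol
    simp only [List.filterMap_cons]
    by_cases hlt : i < (blocks.getD idx []).length
    · simp only [hlt, if_pos]
      rw [List.getElem?_eq_getElem hlt, List.getD_eq_getElem _ _ hlt]
      simp
    · simp only [hlt]
      rw [List.getElem?_eq_none (by omega)]
      simp

-- the reordered list is a permutation of blocks
theorem reordered_perm (blocks : List (List Int)) (round_idx : Int) :
    ((pvOrder blocks round_idx).map (fun idx => blocks.getD idx [])).Perm blocks := by
  have hrange : (List.range blocks.length).map (fun idx => blocks.getD idx []) = blocks := by
    apply List.ext_getElem
    · simp
    · intro i h1 h2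
      simp only [List.getElem_map, List.getElem_range]
      rw [List.getD_eq_getElem]
  unfold pvOrder
  set order1 := if PySem.Int.mod round_idx 2 = 1 then (List.range blocks.length).reverse
                else List.range blocks.length with horder1
  have h1 : order1.Perm (List.range blocks.length) := by
    rw [horder1]; split
    · exact List.reverse_perm _
    · exact List.Perm.refl _
  set k := (PySem.Int.mod round_idx (order1.length : Int)).toNat
  have h2 : (order1.drop k ++ order1.take k).Perm order1 := by
    calc (order1.drop k ++ order1.take k).Perm (order1.take k ++ order1.drop k) :=
          List.perm_append_comm
      _ = order1 := List.take_append_drop k order1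
  have h3 : (order1.drop k ++ order1.take k).Perm (List.range blocks.length) := h2.trans h1
  calc ((order1.drop k ++ order1.take k).map (fun idx => blocks.getD idx [])).Perm
        ((List.range blocks.length).map (fun idx => blocks.getD idx [])) := h3.map _
    _ = blocks := hrange

-- ---- tagging machinery for B's decorate-sort-undecorate ----
-- pvShift bumps the column tag (peeling the first column off all rows)
def pvShift (t : Nat × Nat × Int) : Nat × Nat × Int := (t.1 + 1, t.2.1, t.2.2)

-- tags of one row b: elements tagged (column, r) starting at column i
def rowTag (i r : Nat) : List Int → List (Nat × Nat × Int)
  | [] => []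
  | x :: t => (i, r, x) :: rowTag (i + 1) r t

-- row-major tagging of all rows, ranks starting at r (B's `tagged` list)
def rowsTag (r : Nat) : List (List Int) → List (Nat × Nat × Int)
  | [] => []
  | b :: t => rowTag 0 r b ++ rowsTag (r + 1) t

-- tagged column i of the rows, ranks starting at r
def colTag (i r : Nat) : List (List Int) → List (Nat × Nat × Int)
  | [] => []
  | b :: t => (match b[i]? with | some x => [(i, r, x)] | none => []) ++ colTag i (r + 1) t

-- B's lexicographic sort key
def pvKey (t : Nat × Nat × Int) : Lex (Nat × Nat) := toLex (t.1, t.2.1)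

theorem zipIdx_rowTag (b : List Int) (i r : Nat) :
    (b.zipIdx i).map (fun q => (q.2, r, q.1)) = rowTag i r b := by
  induction b generalizing i with
  | nil => simp [rowTag]
  | cons x t ih => simp [List.zipIdx_cons, rowTag, ih]

theorem tagged_eq_rowsTag (blocks : List (List Int)) (order : List Nat) (r : Nat) :
    ((order.zipIdx r).flatMap (fun p =>
        ((blocks.getD p.1 []).zipIdx).map (fun q => (q.2, p.2, q.1))))
      = rowsTag r (order.map (fun idx => blocks.getD idx [])) := by
  induction order generalizing r with
  | nil => simp [rowsTag]
  | cons idx rest ih =>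
    simp only [List.zipIdx_cons, List.flatMap_cons, List.map_cons, rowsTag]
    rw [ih, zipIdx_rowTag]

theorem rowTag_shift (b : List Int) (i r : Nat) :
    rowTag (i + 1) r b = (rowTag i r b).map pvShift := by
  induction b generalizing i with
  | nil => simp [rowTag]
  | cons x t ih => simp [rowTag, pvShift, ih]

theorem colTag_succ (i r : Nat) (rs : List (List Int)) :
    colTag (i + 1) r rs = (colTag i r (rs.map (·.tail))).map pvShift := by
  induction rs generalizing r with
  | nil => simp [colTag]
  | cons b t ih =>
    simp only [List.map_cons, colTag, List.map_append, ih]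
    congr 1
    rw [← List.getElem?_tail]
    cases b.tail[i]? <;> simp [pvShift]

theorem rowsTag_nil_of_all_empty (rs : List (List Int)) (r : Nat)
    (h : rs.all (·.isEmpty) = true) : rowsTag r rs = [] := by
  induction rs generalizing r with
  | nil => rfl
  | cons b t ih =>
    simp only [List.all_cons, Bool.and_eq_true, List.isEmpty_iff] at h
    simp [rowsTag, h.1, rowTag, ih (r + 1) h.2]

-- peel column 0 off the row-major tagging, up to permutation
theorem rowsTag_perm_decomp (rs : List (List Int)) (r : Nat) :
    (rowsTag r rs).Perm (colTag 0 r rs ++ (rowsTag r (rs.map (·.tail))).map pvShift) := by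
  induction rs generalizing r with
  | nil => simp [rowsTag, colTag]
  | cons b t ih =>
    have hrow : rowTag 0 r b
        = (match b[0]? with | some x => [(0, r, x)] | none => []) ++ (rowTag 0 r b.tail).map pvShift := by
      cases b with
      | nil => simp [rowTag]
      | cons x tb => simp [rowTag, rowTag_shift]
    set H := (match b[0]? with | some x => [((0 : Nat), r, x)] | none => ([] : List (Nat × Nat × Int))) with hH
    set S1 := (rowTag 0 r b.tail).map pvShift with hS1
    set C := colTag 0 (r + 1) t with hC
    set S2 := (rowsTag (r + 1) (t.map (·.tail))).map pvShift with hS2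
    have h1 : (rowsTag r (b :: t)).Perm ((H ++ S1) ++ (C ++ S2)) := by
      simp only [rowsTag]
      rw [hrow]
      exact List.Perm.append_left _ (ih (r + 1))
    have h2 : ((H ++ S1) ++ (C ++ S2)).Perm ((H ++ C) ++ (S1 ++ S2)) := by
      simp only [List.append_assoc]
      refine List.Perm.append_left H ?_
      have h := (List.perm_append_comm (l₁ := S1) (l₂ := C)).append_right S2
      simpa [List.append_assoc] using h
    have h3 : colTag 0 r (b :: t) ++ (rowsTag r ((b :: t).map (·.tail))).map pvShift
        = (H ++ C) ++ (S1 ++ S2) := by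
      simp only [colTag, rowsTag, List.map_cons, List.map_append, List.append_assoc]
      rfl
    rw [h3]
    exact h1.trans h2

-- row-major tagging is a permutation of the column-major tagging
theorem cols_perm_rowsTag (n : Nat) (rs : List (List Int)) (h : pvMaxLen rs ≤ n) :
    ((List.range n).flatMap (fun i => colTag i 0 rs)).Perm (rowsTag 0 rs) := by
  induction n generalizing rs with
  | zero =>
    have : rs.all (·.isEmpty) = true := (pvMaxLen_eq_zero rs).mp (by omega)
    simp [rowsTag_nil_of_all_empty rs 0 this]
  | succ m ih =>
    have htail : pvMaxLen (rs.map (·.tail)) ≤ m := by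
      rw [pvMaxLen_tail]; omega
    have e1 : ((List.range (m + 1)).flatMap (fun i => colTag i 0 rs))
        = colTag 0 0 rs ++ ((List.range m).flatMap (fun i => colTag i 0 (rs.map (·.tail)))).map pvShift := by
      rw [List.range_succ_eq_map, List.flatMap_cons, List.flatMap_map, List.map_flatMap]
      congr 1
      exact List.flatMap_congr (fun i _ => colTag_succ i 0 rs)
    rw [e1]
    have hp := (ih (rs.map (·.tail)) htail).map pvShift
    exact (List.Perm.append_left _ hp).trans (rowsTag_perm_decomp rs 0).symm

theorem mem_colTag {t : Nat × Nat × Int} {i r : Nat} {rs : List (List Int)}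
    (h : t ∈ colTag i r rs) : t.1 = i ∧ r ≤ t.2.1 := by
  induction rs generalizing r with
  | nil => simp [colTag] at h
  | cons b tl ih =>
    simp only [colTag, List.mem_append] at h
    rcases h with h | h
    · rcases hb : b[i]? with _ | x <;> rw [hb] at h <;> simp at h
      subst h; exact ⟨rfl, le_refl _⟩
    · obtain ⟨h1, h2⟩ := ih h
      exact ⟨h1, by omega⟩

theorem colTag_pairwise (i r : Nat) (rs : List (List Int)) :
    List.Pairwise (fun a b => a.2.1 < b.2.1) (colTag i r rs) := by
  induction rs generalizing r with
  | nil => simp [colTag]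
  | cons b tl ih =>
    simp only [colTag]
    apply List.pairwise_append.mpr
    refine ⟨?_, ih (r + 1), ?_⟩
    · rcases b[i]? <;> simp
    · intro a ha c hc
      have hc' := (mem_colTag hc).2
      rcases hb : b[i]? with _ | x <;> rw [hb] at ha <;> simp at ha
      rw [ha]
      simpa using by omega

theorem cols_pairwise (n : Nat) (rs : List (List Int)) :
    List.Pairwise (fun a b => pvKey a < pvKey b)
      ((List.range n).flatMap (fun i => colTag i 0 rs)) := by
  induction n with
  | zero => simp
  | succ m ih =>
    rw [List.range_succ, List.flatMap_append, List.flatMap_singleton]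
    apply List.pairwise_append.mpr
    refine ⟨ih, ?_, ?_⟩
    · have := colTag_pairwise m 0 rs
      refine this.imp_of_mem ?_
      intro a b ha hb hlt
      have ha' := (mem_colTag ha).1
      have hb' := (mem_colTag hb).1
      simp only [pvKey, Prod.Lex.lt_iff, ofLex_toLex]
      right
      exact ⟨by rw [ha', hb'], hlt⟩
    · intro a ha b hb
      obtain ⟨i, hi, hai⟩ := List.mem_flatMap.mp ha
      have hi' : i < m := List.mem_range.mp hi
      have ha1 := (mem_colTag hai).1
      have hb1 := (mem_colTag hb).1
      simp only [pvKey, Prod.Lex.lt_iff, ofLex_toLex]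
      left
      rw [ha1, hb1]
      exact hi'

theorem map_third_colTag (i r : Nat) (rs : List (List Int)) :
    (colTag i r rs).map (fun t => t.2.2) = pvCol i rs := by
  induction rs generalizing r with
  | nil => simp [colTag, pvCol]
  | cons b tl ih =>
    simp only [colTag, pvCol, List.map_append, List.filterMap_cons]
    rcases b[i]? <;> simp [ih (r + 1), pvCol]

-- Python's sort by the tuple key (t[0], t[1]) is the sort by the lexicographic key
theorem sorted2_eq_sorted_lex (xs : List (Nat × Nat × Int)) :
    PySem.List.sorted2 xs (fun t => t.1) (fun t => t.2.1)
      = PySem.List.sorted xs pvKey := by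
  unfold PySem.List.sorted2 PySem.List.sorted
  have hbefore : (fun (a b : Nat × Nat × Int) =>
      decide (a.1 < b.1) || (!decide (b.1 < a.1) && decide (a.2.1 < b.2.1)))
      = fun a b => decide (pvKey a < pvKey b) := by
    funext a b
    simp only [pvKey, Prod.Lex.lt_iff]
    rcases Nat.lt_trichotomy a.1 b.1 with h | h | h
    · simp [h, Nat.not_lt.mpr (Nat.le_of_lt h)]
    · simp [h]
    · simp [h, Nat.not_lt.mpr (Nat.le_of_lt h), Nat.ne_of_gt h]
  simp only [if_neg (by decide : ¬ (false = true))]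
  rw [hbefore]

-- ===== VERDICT (by name: the statement is the Claim_ definition above) =====
theorem interleave_blocks_py_spec : Claim_equal_interleave_blocks_py := by
  intro blocks interleave round_idx _ _
  unfold Spec_interleave_blocks_py interleave_blocks_py interleave_blocks_py_alt
  cases interleave with
  | false =>
    simp only [Bool.not_false, if_pos]
    rw [PySem.List.foldl_append_eq_flatten]
    simp
  | true =>
    simp only [Bool.not_true, Bool.false_eq_true, if_false]
    set rs := (pvOrder blocks round_idx).map (fun idx => blocks.getD idx []) with hrs
    have hmax : pvMaxLen rs = blocks.foldl (fun m b => max m b.length) 0 := by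
      have := pvMaxLen_perm (reordered_perm blocks round_idx)
      simpa [pvMaxLen] using this
    -- A's side: the nested loops build the concatenation of the columns
    have hA : (List.range (blocks.foldl (fun m b => max m b.length) 0)).foldl (fun s i =>
        (pvOrder blocks round_idx).foldl (fun s idx =>
          let blk := blocks.getD idx []
          if i < blk.length then s ++ [blk.getD i 0] else s) s) []
        = (List.range (pvMaxLen rs)).flatMap (fun i => pvCol i rs) := by
      rw [hmax]
      have hstep : (fun (s : List Int) (i : Nat) =>
          (pvOrder blocks round_idx).foldl (fun s idx =>
            let blk := blocks.getD idx []
            if i < blk.length then s ++ [blk.getD i 0] else s) s)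
          = fun s i => s ++ pvCol i rs := by
        funext s i
        exact inner_loop_eq blocks i _ s
      rw [hstep, PySem.List.foldl_append_eq_flatMap, List.nil_append]
    rw [hA]
    -- B's side: the sorted tagged list is the column-major tagged list
    rw [tagged_eq_rowsTag, sorted2_eq_sorted_lex, ← hrs]
    have hsort : PySem.List.sorted (rowsTag 0 rs) pvKey
        = (List.range (pvMaxLen rs)).flatMap (fun i => colTag i 0 rs) :=
      PySem.List.sorted_eq_of_perm_of_pairwise_lt _ _ pvKey
        (cols_perm_rowsTag (pvMaxLen rs) rs (le_refl _))
        (cols_pairwise (pvMaxLen rs) rs)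
    rw [hsort, List.map_flatMap]
    exact List.flatMap_congr (fun i _ => (map_third_colTag i 0 rs).symm)
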